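-- pv_equiv track=rewrite | github.com/gimewn/Problem-Solving | 프로그래머스/unrated/135808. 과일 장수/과일 장수.py | solution
-- ===== SOURCE A (Python) =====
-- def solution(k, m, score):
--     answer = 0
--     score.sort(reverse=True)
--
--     for idx in range(0, len(score), m):
--         temp = score[idx:idx+m]
--         if len(temp) == m:
--             answer += min(temp)*m
--
--     return answer
-- ===== SOURCE B (Python) =====
-- def solution(k, m, score):
--     # Frequency/rank-counting algorithm: no per-group work at all.  Build a
--     # value->count map, walk the distinct values in descending order with a
--     # cumulative rank, and count arithmetically how many full-group minima
--     # (descending ranks m-1, 2m-1, ..., g*m-1) fall inside each value's rank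
--     # block.  NOTE: A sorts `score` in place; B does not mutate its argument —
--     # the equivalence is about the return value only.
--     g = len(score) // m          # number of full groups (raises on m == 0, as A does)
--     freq = {}
--     for v in score:
--         freq[v] = freq.get(v, 0) + 1
--     answer = 0
--     c = 0                        # ranks [c, c+f) belong to the current value
--     for v in sorted(freq, reverse=True):
--         f = freq[v]
--         lo = c // m + 1          # smallest j in [1, g] with j*m-1 >= c
--         hi = min(g, (c + f) // m)   # largest such j with j*m-1 < c+f
--         if lo <= hi:
--             answer += v * (hi - lo + 1) * m
--         c += f
--     return answer
-- ===== Notes on version B (the rewrite author's own statement) =====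
-- stated objective: alternative
-- what changed: Replaces A's slice-each-group-and-take-min pass over the sorted list by a frequency-map algorithm: build a value->count dict, walk the distinct values in descending order with a cumulative rank, and count arithmetically (via floor divisions) how many full-group minimum ranks fall inside each value's rank block; B also does not mutate score (A sorts it in place).
-- outside the precondition, e.g. on solution(1, 0, [3, 1]): A raises ValueError, B raises ZeroDivisionError
import Mathlib
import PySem

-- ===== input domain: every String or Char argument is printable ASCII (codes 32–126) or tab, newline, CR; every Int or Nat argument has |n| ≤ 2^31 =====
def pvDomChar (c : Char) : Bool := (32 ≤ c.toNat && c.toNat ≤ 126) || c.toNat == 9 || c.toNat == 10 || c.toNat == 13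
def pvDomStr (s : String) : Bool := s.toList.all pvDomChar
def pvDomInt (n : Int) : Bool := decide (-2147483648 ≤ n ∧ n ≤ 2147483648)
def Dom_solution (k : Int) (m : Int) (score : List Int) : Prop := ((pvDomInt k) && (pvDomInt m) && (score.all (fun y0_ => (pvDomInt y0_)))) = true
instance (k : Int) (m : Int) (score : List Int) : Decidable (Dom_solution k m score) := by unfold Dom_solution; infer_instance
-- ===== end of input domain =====

-- B replaces A's slice-each-group-and-take-min pass over the sorted list by a frequency-map
-- algorithm (value -> count, cumulative ranks, minima counted by floor division); A sorts
-- `score` in place while B leaves it untouched — the equivalence proved is about the return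
-- value only.

-- ===== PORT A =====
def solution (k : Int) (m : Int) (score : List Int) : Int :=
  let s := PySem.List.sorted score (fun x => x) true
  (PySem.List.pyRange 0 (s.length : Int) m).foldl
    (fun answer idx =>
      let temp := PySem.List.slice s (some idx) (some (idx + m))
      if (temp.length : Int) = m then
        -- `.getD 0` is unreachable: the guard makes temp nonempty (m > 0 there)
        answer + ((PySem.List.min? temp (fun x => x)).getD 0) * m
      else answer) 0

-- ===== PORT B =====
def solution_alt (k : Int) (m : Int) (score : List Int) : Int :=
  let g := PySem.Int.floordiv (score.length : Int) m
  let freq := score.foldl (fun d v => d.insert v (d.getD v 0 + 1))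
    (PySem.Dict.empty : PySem.Dict Int Int)
  let r := (PySem.List.sorted freq.keys (fun x => x) true).foldl
    (fun (p : Int × Int) v =>
      let f := freq.getD v 0
      let lo := PySem.Int.floordiv p.2 m + 1
      let hi := min g (PySem.Int.floordiv (p.2 + f) m)
      (if lo ≤ hi then p.1 + v * (hi - lo + 1) * m else p.1, p.2 + f)) (0, 0)
  r.1

-- ===== PRECONDITION & SPEC =====
-- Pre_ excludes exactly m = 0, where Python raises in A (range step 0, ValueError) and in B
-- (len(score) // 0, ZeroDivisionError) alike.
def Pre_solution (k : Int) (m : Int) (score : List Int) : Prop := m ≠ 0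
instance (k : Int) (m : Int) (score : List Int) : Decidable (Pre_solution k m score) := by unfold Pre_solution; infer_instance
def pvWitness_solution : Int × Int × List Int := (4, 2, [4, 1, 2, 2, 3])

def Spec_solution (k : Int) (m : Int) (score : List Int) (out : Int) : Prop := out = solution_alt k m score
instance (k : Int) (m : Int) (score : List Int) (out : Int) : Decidable (Spec_solution k m score out) := by unfold Spec_solution; infer_instance

-- ===== CLAIM (what is proved, stated in full; the proofs are below) =====
def Claim_equal_solution : Prop := ∀ (k : Int) (m : Int) (score : List Int), Dom_solution k m score → Pre_solution k m score → Spec_solution k m score (solution k m score)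

-- ===== LEMMAS AND PROOFS =====

-- range(a, b, s) with positive step s is empty when b ≤ a
theorem pvRange_pos_nil (a b s : Int) (hs : 0 < s) (h : b ≤ a) :
    PySem.List.pyRange a b s = [] := by
  rw [PySem.List.pyRange_of_pos a b hs]
  simp [show ¬ a < b by omega]

-- range(a, b, s) with positive step s and a < b peels off its head
theorem pvRange_pos_cons (a b s : Int) (hs : 0 < s) (h : a < b) :
    PySem.List.pyRange a b s = a :: PySem.List.pyRange (a + s) b s := by
  rw [PySem.List.pyRange_of_pos a b hs, PySem.List.pyRange_of_pos (a + s) b hs]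
  have hstep : (b - a + s - 1) / s = (b - a - 1) / s + 1 := by
    rw [show b - a + s - 1 = (b - a - 1) + 1 * s by ring]
    exact Int.add_mul_ediv_right _ _ (by omega)
  have hnn : 0 ≤ (b - a - 1) / s := Int.ediv_nonneg (by omega) (by omega)
  have hcount : ((b - a + s - 1) / s).toNat = ((b - a - 1) / s).toNat + 1 := by omega
  have htail : (if a + s < b then ((b - (a + s) + s - 1) / s).toNat else 0)
      = ((b - a - 1) / s).toNat := by
    by_cases hlt : a + s < b
    · simp only [hlt, if_true]
      congr 1
      ring
    · simp only [hlt, if_false]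
      have : (b - a - 1) / s = 0 := Int.ediv_eq_zero_of_lt (by omega) (by omega)
      omega
  rw [show (if a < b then ((b - a + s - 1) / s).toNat else 0) = ((b - a - 1) / s).toNat + 1 by
        simp [h, hcount],
      htail, List.range_succ_eq_map]
  simp only [List.map_cons, List.map_map]
  congr 1
  · simp
  · apply List.map_congr_left
    intro k _
    simp [Function.comp]
    ring

-- range(a, b, s) with negative step s is empty when a ≤ b
theorem pvRange_neg_nil (a b s : Int) (hs : s < 0) (h : a ≤ b) :
    PySem.List.pyRange a b s = [] := by
  unfold PySem.List.pyRange
  simp [show ¬ s = 0 by omega, show ¬ 0 < s by omega, show ¬ b < a by omega]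

-- in a descending (pairwise ≥) list the last element is a lower bound
theorem pvLast_le_of_desc : ∀ (t : List Int) (h : t ≠ []),
    t.Pairwise (fun a b => b ≤ a) → ∀ y ∈ t, t.getLast h ≤ y := by
  intro t
  induction t with
  | nil => intro h; exact absurd rfl h
  | cons a t ih =>
    intro _ hp y hy
    rcases List.pairwise_cons.mp hp with ⟨ha, ht⟩
    cases t with
    | nil =>
      simp at hy; simp [hy]
    | cons b t' =>
      rw [List.getLast_cons (by simp : (b :: t') ≠ [])]
      rcases List.mem_cons.mp hy with rfl | hy'
      · exact ha _ (List.getLast_mem (by simp))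
      · exact ih (by simp) ht _ hy'

-- Python's min of a nonempty descending list equals its last element
theorem pvMin_of_desc (t : List Int) (h : t ≠ [])
    (hp : t.Pairwise (fun a b => b ≤ a)) :
    (PySem.List.min? t (fun x => x)).getD 0 = t.getLast h := by
  cases hmin : PySem.List.min? t (fun x => x) with
  | none => exact absurd ((PySem.List.min?_eq_none_iff t _).mp hmin) h
  | some v =>
    have hv1 : v ≤ t.getLast h := PySem.List.min?_isMin hmin _ (List.getLast_mem h)
    have hv2 : t.getLast h ≤ v := pvLast_le_of_desc t h hp v (PySem.List.min?_mem hmin)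
    simpa using le_antisymm hv1 hv2

-- a contiguous chunk of a descending list is descending
theorem pvChunk_desc (s : List Int) (hp : s.Pairwise (fun a b => b ≤ a)) (a b : Nat) :
    ((s.drop a).take b).Pairwise (fun a b => b ≤ a) :=
  List.Pairwise.sublist ((List.take_sublist _ _).trans (List.drop_sublist _ _)) hp

-- A's loop from a group boundary j equals the strided sum over the last index of each full group
theorem pvMain (s : List Int) (m : Int) (hm : 0 < m)
    (hp : s.Pairwise (fun a b => b ≤ a)) :
    ∀ (fuel : Nat) (j : Int), 0 ≤ j → (s.length : Int) - j ≤ fuel → ∀ acc : Int,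
      (PySem.List.pyRange j (s.length : Int) m).foldl
        (fun answer idx =>
          let temp := PySem.List.slice s (some idx) (some (idx + m))
          if (temp.length : Int) = m then
            answer + ((PySem.List.min? temp (fun x => x)).getD 0) * m
          else answer) acc
      = (PySem.List.pyRange (j + m - 1) (s.length : Int) m).foldl
          (fun answer i => answer + PySem.List.pyGetD s i 0 * m) acc := by
  intro fuel
  induction fuel with
  | zero =>
    intro j hj hf acc
    rw [pvRange_pos_nil _ _ _ hm (by omega), pvRange_pos_nil _ _ _ hm (by omega)]
    rfl
  | succ fuel ih =>
    intro j hj hf acc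
    by_cases hjn : (s.length : Int) ≤ j
    · rw [pvRange_pos_nil _ _ _ hm hjn, pvRange_pos_nil _ _ _ hm (by omega)]
      rfl
    · push_neg at hjn
      rw [pvRange_pos_cons _ _ _ hm hjn]
      by_cases hfull : j + m ≤ (s.length : Int)
      · have hjm1 : (0:Int) ≤ j + m - 1 := by omega
        have hjm1n : j + m - 1 < (s.length : Int) := by omega
        rw [pvRange_pos_cons _ _ _ hm (by omega : j + m - 1 < (s.length : Int))]
        simp only [List.foldl_cons]
        have hslice : PySem.List.slice s (some j) (some (j + m))
            = (s.drop j.toNat).take ((j + m).toNat - j.toNat) :=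
          PySem.List.slice_toNat s hj (by omega)
        have hlen : (((s.drop j.toNat).take ((j + m).toNat - j.toNat)).length : Int) = m := by
          simp [List.length_take, List.length_drop]
          omega
        have htne : (s.drop j.toNat).take ((j + m).toNat - j.toNat) ≠ [] := by
          intro hnil
          rw [hnil] at hlen
          simp at hlen
          omega
        have hA : (if ((PySem.List.slice s (some j) (some (j + m))).length : Int) = m then
              acc + ((PySem.List.min? (PySem.List.slice s (some j) (some (j + m))) (fun x => x)).getD 0) * m
            else acc) = acc + PySem.List.pyGetD s (j + m - 1) 0 * m := by
          rw [hslice, if_pos hlen,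
              pvMin_of_desc _ htne (pvChunk_desc s hp _ _),
              PySem.List.pyGetD_eq_getElem s 0 hjm1 hjm1n]
          congr 1
          have hidx : ((j + m).toNat - j.toNat) - 1 < (s.drop j.toNat).length := by
            simp [List.length_drop]; omega
          rw [List.getLast_eq_getElem, List.getElem_take, List.getElem_drop]
          congr 2
          simp [List.length_take, List.length_drop]
          omega
        calc (PySem.List.pyRange (j + m) (s.length : Int) m).foldl
              (fun answer idx =>
                let temp := PySem.List.slice s (some idx) (some (idx + m))
                if (temp.length : Int) = m then
                  answer + ((PySem.List.min? temp (fun x => x)).getD 0) * m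
                else answer)
              (let temp := PySem.List.slice s (some j) (some (j + m))
               if (temp.length : Int) = m then
                 acc + ((PySem.List.min? temp (fun x => x)).getD 0) * m
               else acc)
            = (PySem.List.pyRange ((j + m) + m - 1) (s.length : Int) m).foldl
                (fun answer i => answer + PySem.List.pyGetD s i 0 * m)
                (acc + PySem.List.pyGetD s (j + m - 1) 0 * m) := by
              rw [show (let temp := PySem.List.slice s (some j) (some (j + m))
                   if (temp.length : Int) = m then
                     acc + ((PySem.List.min? temp (fun x => x)).getD 0) * m
                   else acc) = acc + PySem.List.pyGetD s (j + m - 1) 0 * m from hA]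
              exact ih (j + m) (by omega) (by omega) _
          _ = (PySem.List.pyRange (j + m - 1 + m) (s.length : Int) m).foldl
                (fun answer i => answer + PySem.List.pyGetD s i 0 * m)
                (acc + PySem.List.pyGetD s (j + m - 1) 0 * m) := by
              congr 2
              omega
      · push_neg at hfull
        have hslice : PySem.List.slice s (some j) (some (j + m))
            = (s.drop j.toNat).take ((j + m).toNat - j.toNat) :=
          PySem.List.slice_toNat s hj (by omega)
        have hlen : ¬ (((PySem.List.slice s (some j) (some (j + m))).length : Int) = m) := by
          rw [hslice]
          simp [List.length_take, List.length_drop]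
          omega
        simp only [List.foldl_cons, hlen, if_false]
        rw [pvRange_pos_nil _ _ _ hm (by omega : (s.length : Int) ≤ j + m),
            pvRange_pos_nil _ _ _ hm (by omega : (s.length : Int) ≤ j + m - 1)]
        rfl


theorem pvAsum (m : Int) (hm : 0 < m) (s : List Int) :
    (PySem.List.pyRange (m - 1) (s.length : Int) m).foldl
        (fun answer i => answer + PySem.List.pyGetD s i 0 * m) 0
    = ∑ j ∈ Finset.range ((PySem.Int.floordiv (s.length : Int) m)).toNat,
        PySem.List.pyGetD s (((j : Int) + 1) * m - 1) 0 * m := by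
  have hcount : (if m - 1 < (s.length : Int) then (((s.length : Int) - (m - 1) + m - 1) / m).toNat else 0)
      = (PySem.Int.floordiv (s.length : Int) m).toNat := by
    rw [PySem.Int.floordiv_eq_ediv_of_pos hm]
    by_cases h : m - 1 < (s.length : Int)
    · simp only [h, if_true]
      congr 2
      ring
    · simp only [h, if_false]
      have : (s.length : Int) / m = 0 := Int.ediv_eq_zero_of_lt (by positivity) (by omega)
      omega
  rw [PySem.List.pyRange_of_pos _ _ hm, hcount, List.foldl_map, PySem.List.foldl_add, zero_add]
  rw [show ∀ (N : Nat) (f : Nat → Int), ((List.range N).map f).sum = ∑ j ∈ Finset.range N, f j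
        from fun _ _ => rfl]
  exact Finset.sum_congr rfl (fun j _ => by ring_nf)


theorem pvFlat_pw (cnt : Int → Nat) : ∀ (l : List Int), l.Pairwise (fun a b => b < a) →
    (l.flatMap (fun v => List.replicate (cnt v) v)).Pairwise (fun a b => b ≤ a) := by
  intro l
  induction l with
  | nil => intro; simp
  | cons v l ih =>
    intro hp
    rcases List.pairwise_cons.mp hp with ⟨hv, hl⟩
    rw [List.flatMap_cons, List.pairwise_append]
    refine ⟨List.pairwise_replicate.mpr (Or.inr le_rfl), ih hl, ?_⟩
    intro a ha b hb
    rcases List.mem_flatMap.mp hb with ⟨w, hw, hbw⟩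
    have : a = v := (List.eq_of_mem_replicate ha)
    have : b = w := (List.eq_of_mem_replicate hbw)
    subst_vars
    exact le_of_lt (hv _ hw)

theorem pvFlat_count (cnt : Int → Nat) : ∀ (l : List Int), l.Nodup → ∀ x : Int,
    (l.flatMap (fun v => List.replicate (cnt v) v)).count x = if x ∈ l then cnt x else 0 := by
  intro l
  induction l with
  | nil => intro _ x; simp
  | cons v l ih =>
    intro hnd x
    rcases List.nodup_cons.mp hnd with ⟨hv, hl⟩
    rw [List.flatMap_cons, List.count_append, List.count_replicate, ih hl x]
    by_cases hxv : x = v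
    · subst hxv
      simp [hv]
    · simp [hxv, Ne.symm hxv, beq_iff_eq]

theorem pvRuns (score : List Int) :
    PySem.List.sorted score (fun x => x) true
      = (PySem.List.sorted (PySem.Set.ofList score) (fun x => x) true).flatMap
          (fun v => List.replicate (score.count v) v) := by
  set ks := PySem.List.sorted (PySem.Set.ofList score) (fun x => x) true with hks
  have hnd : ks.Nodup :=
    ((PySem.List.sorted_perm (PySem.Set.ofList score) (fun x => x) true).nodup_iff).mpr
      (PySem.Set.nodup_ofList score)
  have hpw : ks.Pairwise (fun a b => b ≤ a) :=
    PySem.List.sorted_pairwise_rev (PySem.Set.ofList score) (fun x => x)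
  have hstrict : ks.Pairwise (fun a b => b < a) :=
    (hpw.and hnd).imp (fun h => lt_of_le_of_ne h.1 (Ne.symm h.2))
  have hcnt := pvFlat_count (fun v => score.count v) ks hnd
  have hmem : ∀ x : Int, x ∈ ks ↔ x ∈ score := by
    intro x
    rw [hks, PySem.List.mem_sorted, PySem.Set.mem_ofList]
  have hpermt : (ks.flatMap (fun v => List.replicate (score.count v) v)).Perm score := by
    rw [List.perm_iff_count]
    intro x
    rw [hcnt x]
    by_cases hx : x ∈ ks
    · simp [hx]
    · simp only [hx, if_false]
      exact (List.count_eq_zero.mpr (fun h => hx ((hmem x).mpr h))).symm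
  refine List.Perm.eq_of_pairwise (fun a b _ _ h1 h2 => le_antisymm h2 h1) ?_ ?_ ?_
  · exact PySem.List.sorted_pairwise_rev score (fun x => x)
  · exact pvFlat_pw _ ks hstrict
  · exact (PySem.List.sorted_perm score (fun x => x) true).trans hpermt.symm


theorem pvBfold (m : Int) (hm : 0 < m) (s : List Int) (cnt : Int → Nat)
    (g : Int) (hg0 : 0 ≤ g) (hgm : g * m ≤ (s.length : Int)) :
    ∀ (l : List Int) (c : Nat) (acc : Int),
      s.drop c = l.flatMap (fun v => List.replicate (cnt v) v) →
      (l.foldl (fun (p : Int × Int) v =>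
          (if PySem.Int.floordiv p.2 m + 1
                ≤ min g (PySem.Int.floordiv (p.2 + (cnt v : Int)) m) then
              p.1 + v * (min g (PySem.Int.floordiv (p.2 + (cnt v : Int)) m)
                          - (PySem.Int.floordiv p.2 m + 1) + 1) * m
            else p.1,
           p.2 + (cnt v : Int))) (acc, (c : Int))).1
      = acc + ∑ j ∈ Finset.range g.toNat,
          (if (c : Int) ≤ ((j : Int) + 1) * m - 1
            then PySem.List.pyGetD s (((j : Int) + 1) * m - 1) 0 * m else 0) := by
  intro l
  induction l with
  | nil =>
    intro c acc hc
    have hlc : s.length ≤ c := by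
      have := List.drop_eq_nil_iff.mp (by simpa using hc)
      omega
    rw [List.foldl_nil]
    have hz : ∀ j ∈ Finset.range g.toNat,
        (if (c : Int) ≤ ((j : Int) + 1) * m - 1
          then PySem.List.pyGetD s (((j : Int) + 1) * m - 1) 0 * m else 0) = 0 := by
      intro j hj
      have hjg : (j : Int) + 1 ≤ g := by
        have := Finset.mem_range.mp hj
        omega
      have h1 : ((j : Int) + 1) * m ≤ g * m := mul_le_mul_of_nonneg_right hjg (by omega)
      refine if_neg ?_
      have h2 : (s.length : Int) ≤ (c : Int) := by exact_mod_cast hlc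
      intro h
      linarith
    rw [Finset.sum_congr rfl hz]
    simp
  | cons v l ih =>
    intro c acc hc
    rw [List.flatMap_cons] at hc
    have hlen : s.length - c = cnt v + (l.flatMap (fun v => List.replicate (cnt v) v)).length := by
      have h := congrArg List.length hc
      simp only [List.length_drop, List.length_append, List.length_replicate] at h
      omega
    have hdrop' : s.drop (c + cnt v) = l.flatMap (fun v => List.replicate (cnt v) v) := by
      rw [← List.drop_drop, hc, List.drop_left' (by simp)]
    -- every index in [c, c + cnt v) holds the value v
    have hval : ∀ i : Int, (c : Int) ≤ i → i < (c : Int) + (cnt v : Int) →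
        PySem.List.pyGetD s i 0 = v := by
      intro i h1 h2
      have hin : i < (s.length : Int) := by omega
      rw [PySem.List.pyGetD_eq_getElem s 0 (by omega) hin]
      have hopt : s[i.toNat]? = some v := by
        have h4 : i.toNat = c + (i.toNat - c) := by omega
        rw [h4, ← List.getElem?_drop, hc,
            List.getElem?_append_left (by simp only [List.length_replicate]; omega),
            List.getElem?_replicate, if_pos (by omega)]
      have h5 := List.getElem?_eq_getElem (l := s) (i := i.toNat) (by omega)
      rw [hopt] at h5
      exact (Option.some.inj h5).symm
    set q1 := PySem.Int.floordiv (c : Int) m with hq1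
    set q2 := PySem.Int.floordiv ((c : Int) + (cnt v : Int)) m with hq2
    have hq1n : 0 ≤ q1 := by
      rw [hq1]
      exact (PySem.Int.le_floordiv_iff_mul_le hm).mpr (by simp)
    have hq2n : 0 ≤ q2 := by
      rw [hq2]
      refine (PySem.Int.le_floordiv_iff_mul_le hm).mpr ?_
      have := Int.natCast_nonneg c
      have := Int.natCast_nonneg (cnt v)
      linarith
    have hdiff : (∑ j ∈ Finset.range g.toNat,
          (if (c : Int) ≤ ((j : Int) + 1) * m - 1
            then PySem.List.pyGetD s (((j : Int) + 1) * m - 1) 0 * m else 0))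
        - (∑ j ∈ Finset.range g.toNat,
              (if ((c + cnt v : Nat) : Int) ≤ ((j : Int) + 1) * m - 1
                then PySem.List.pyGetD s (((j : Int) + 1) * m - 1) 0 * m else 0))
        = (if q1 + 1 ≤ min g q2 then v * (min g q2 - (q1 + 1) + 1) * m else 0) := by
      rw [← Finset.sum_sub_distrib]
      have hterm : ∀ j ∈ Finset.range g.toNat,
          ((if (c : Int) ≤ ((j : Int) + 1) * m - 1
              then PySem.List.pyGetD s (((j : Int) + 1) * m - 1) 0 * m else 0)
           - (if ((c + cnt v : Nat) : Int) ≤ ((j : Int) + 1) * m - 1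
              then PySem.List.pyGetD s (((j : Int) + 1) * m - 1) 0 * m else 0))
          = (if q1 + 1 ≤ (j : Int) + 1 ∧ (j : Int) + 1 ≤ q2 then v * m else 0) := by
        intro j hj
        have hbr1 := PySem.Int.floordiv_lt_iff_lt_mul (a := (c : Int)) (q := (j : Int) + 1) hm
        have hbr2 := PySem.Int.le_floordiv_iff_mul_le
          (a := (c : Int) + (cnt v : Int)) (q := (j : Int) + 1) hm
        have hA : ((c : Int) ≤ ((j : Int) + 1) * m - 1) ↔ (q1 + 1 ≤ (j : Int) + 1) := by
          rw [hq1]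
          constructor
          · intro h
            have h2 : (c : Int) < ((j : Int) + 1) * m := by linarith
            have := hbr1.mpr h2
            omega
          · intro h
            have h2 : (c : Int) < ((j : Int) + 1) * m := hbr1.mp (by omega)
            linarith
        have hB : (((c + cnt v : Nat) : Int) ≤ ((j : Int) + 1) * m - 1)
            ↔ ¬ ((j : Int) + 1 ≤ q2) := by
          rw [hq2]
          push_cast
          constructor
          · intro h hq
            have := hbr2.mp hq
            linarith
          · intro h
            by_contra h2
            exact h (hbr2.mpr (by linarith))
        simp only [hA, hB]
        by_cases h1 : q1 + 1 ≤ (j : Int) + 1 <;> by_cases h2 : (j : Int) + 1 ≤ q2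
        · have hub : ((j : Int) + 1) * m - 1 < (c : Int) + (cnt v : Int) := by
            have h3 : ¬ (((c + cnt v : Nat) : Int) ≤ ((j : Int) + 1) * m - 1) :=
              fun hx => (hB.mp hx) h2
            push_cast at h3
            omega
          rw [if_pos h1, if_neg (not_not_intro h2), if_pos ⟨h1, h2⟩,
              hval _ (hA.mpr h1) hub]
          ring
        · rw [if_pos h1, if_pos h2, if_neg (by tauto)]
          ring
        · rw [if_neg h1, if_neg (not_not_intro h2), if_neg (by tauto)]
          ring
        · exfalso
          have h3 := hB.mpr h2
          have h4 : (c : Int) ≤ ((j : Int) + 1) * m - 1 := by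
            push_cast at h3
            omega
          exact h1 (hA.mp h4)
      rw [Finset.sum_congr rfl hterm, ← Finset.sum_filter]
      have hfil : (Finset.range g.toNat).filter
            (fun (j : Nat) => q1 + 1 ≤ (j : Int) + 1 ∧ (j : Int) + 1 ≤ q2)
          = Finset.Ico q1.toNat (min g q2).toNat := by
        ext j
        simp only [Finset.mem_filter, Finset.mem_range, Finset.mem_Ico]
        omega
      rw [hfil, Finset.sum_const, Nat.card_Ico, nsmul_eq_mul]
      by_cases h : q1 + 1 ≤ min g q2
      · rw [if_pos h]
        have h6 : (((min g q2).toNat - q1.toNat : Nat) : Int) = min g q2 - q1 := by omega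
        rw [h6]
        ring
      · rw [if_neg h]
        have h6 : (min g q2).toNat - q1.toNat = 0 := by omega
        rw [h6]
        simp
    have hq2' : q2 = PySem.Int.floordiv (((c + cnt v : Nat) : Int)) m := by
      rw [hq2]
      norm_cast
    simp only [List.foldl_cons]
    rw [show ((c : Int) + (cnt v : Int)) = ((c + cnt v : Nat) : Int) by push_cast; ring]
    rw [ih (c + cnt v) _ hdrop', ← hq1, ← hq2']
    by_cases h : q1 + 1 ≤ min g q2
    · rw [if_pos h] at hdiff ⊢
      linarith
    · rw [if_neg h] at hdiff ⊢
      linarith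

theorem pvBneg (m : Int) (hm : m < 0) (g : Int) (cnt : Int → Nat) :
    ∀ (l : List Int) (c acc : Int),
      (l.foldl (fun (p : Int × Int) v =>
          (if PySem.Int.floordiv p.2 m + 1
                ≤ min g (PySem.Int.floordiv (p.2 + (cnt v : Int)) m) then
              p.1 + v * (min g (PySem.Int.floordiv (p.2 + (cnt v : Int)) m)
                          - (PySem.Int.floordiv p.2 m + 1) + 1) * m
            else p.1,
           p.2 + (cnt v : Int))) (acc, c)).1 = acc := by
  intro l
  induction l with
  | nil => intro c acc; rfl
  | cons v l ih =>
    intro c acc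
    simp only [List.foldl_cons]
    have hmono : PySem.Int.floordiv (c + (cnt v : Int)) m ≤ PySem.Int.floordiv c m := by
      by_contra h
      push_neg at h
      have h1 := PySem.Int.floordiv_mul_add_mod c m
      have h2 := PySem.Int.floordiv_mul_add_mod (c + (cnt v : Int)) m
      have h3 := PySem.Int.mod_neg_bounds c hm
      have h4 := PySem.Int.mod_neg_bounds (c + (cnt v : Int)) hm
      nlinarith [mul_le_mul_of_nonpos_right (by omega : PySem.Int.floordiv c m + 1 ≤ PySem.Int.floordiv (c + (cnt v : Int)) m) (by omega : m ≤ 0)]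
    rw [if_neg (by omega : ¬ PySem.Int.floordiv c m + 1 ≤ min g (PySem.Int.floordiv (c + (cnt v : Int)) m))]
    exact ih _ _

-- ===== VERDICT (by name: the statement is the Claim_ definition above) =====
theorem solution_spec : Claim_equal_solution := by
  intro k m score _ hpre
  unfold Spec_solution solution solution_alt
  simp only [PySem.Dict.foldl_insert_getD_add_one_eq_counter, PySem.Dict.keys_counter,
    PySem.Dict.getD_counter]
  rcases lt_trichotomy m 0 with hm | hm | hm
  · rw [pvRange_neg_nil 0 ((PySem.List.sorted score (fun x => x) true).length : Int) m hm
        (by positivity), List.foldl_nil]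
    exact (pvBneg m hm _ _ _ 0 0).symm
  · exact absurd hm hpre
  · have hpw := PySem.List.sorted_pairwise_rev score (fun x => x)
    have hA := pvMain (PySem.List.sorted score (fun x => x) true) m hm hpw
      (PySem.List.sorted score (fun x => x) true).length 0 le_rfl (by omega) 0
    rw [show (0 : Int) + m - 1 = m - 1 by ring] at hA
    rw [hA, pvAsum m hm]
    have hlen : ((PySem.List.sorted score (fun x => x) true).length : Int)
        = (score.length : Int) := by
      simp [PySem.List.length_sorted]
    have hg0 : 0 ≤ PySem.Int.floordiv (score.length : Int) m := by
      rw [PySem.Int.floordiv_eq_ediv_of_pos hm]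
      exact Int.ediv_nonneg (by positivity) (by omega)
    have hgm : PySem.Int.floordiv (score.length : Int) m * m
        ≤ ((PySem.List.sorted score (fun x => x) true).length : Int) := by
      rw [hlen, PySem.Int.floordiv_eq_ediv_of_pos hm]
      exact Int.ediv_mul_le _ (by omega)
    have hB := pvBfold m hm (PySem.List.sorted score (fun x => x) true)
      (fun v => List.count v score) (PySem.Int.floordiv (score.length : Int) m) hg0 hgm
      (PySem.List.sorted (PySem.Set.ofList score) (fun x => x) true) 0 0
      (by simpa using pvRuns score)
    simp only [Nat.cast_zero] at hB
    rw [hB, hlen, zero_add]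
    refine Finset.sum_congr rfl (fun j _ => ?_)
    rw [if_pos ?_]
    have h1 : 0 < ((j : Int) + 1) * m := by positivity
    linarith
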